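-- pv_equiv track=rewrite | github.com/cmu-db/noisepage | script/fixed_decimal/magic_number_generator.py | get_magic_number
-- ===== SOURCE A (Python) =====
-- def get_magic_number(divisor, word_size):
--     """
--     Given word size W >= 1 and divisor d, where 1 <= d < 2**W,
--     finds the least integer m and integer p such that
--         floor(mn // 2**p) == floor(n // d) for 0 <= n < 2**W
--     with 0 <= m < 2**(W+1) and p >= W.
--
--     Implements the algorithm described by Hacker's Delight [2E], specifically,
--     section 10-9 Unsigned Division by Divisors >= 1.
--
--     Parameters
--     ----------
--     divisor : int
--         The divisor d in the problem statement.
--     word_size : int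
--         The word size W in the problem statement. The number of bits.
--
--     Returns
--     -------
--     M : hex
--         The magic number.
--     p : int
--         The exponent p.
--     algorithm_type : int
--         Debug information. Valid values are 0 and 1. The case that was used.
--     """
--     d, W = divisor, word_size
--
--     nc = (2**W // d) * d - 1                                # Eqn (24a)
--     for p in range(2 * W + 1):                              # Eqn (29)
--         if 2 ** p > nc * (d - 1 - (2 ** p - 1) % d):        # Eqn (27)
--             m = (2 ** p + d - 1 - (2 ** p - 1) % d) // d    # Eqn (26)
--             # Unsigned case, the magic number M is given by:
--             #   m             if 0 <= m < 2**W
--             #   m - 2**W      if 2**W <= m < 2**(W+1)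
--             if 0 <= m < 2**W:
--                 return m, p, 0
--             elif 2**W <= m < 2**(W+1):
--                 return m - 2**W, p, 1
--             else:
--                 raise RuntimeError("Invalid case. Not enough bits?")
-- ===== SOURCE B (Python) =====
-- def get_magic_number(divisor, word_size):
--     """Hacker's Delight Fig. 10-2 incremental form: no big 2**p powers in the
--     loop body; maintains q1,r1 = divmod(2**p, nc) and q2,r2 = divmod(2**p-1, d)."""
--     d, W = divisor, word_size
--     nc = (2 ** W // d) * d - 1
--     q1, r1 = divmod(1, nc)          # p = 0: 2**0 = 1
--     q2, r2 = 0, 0                   # p = 0: 2**0 - 1 = 0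
--     for p in range(2 * W + 1):
--         delta = d - 1 - r2
--         if q1 > delta or (q1 == delta and r1 > 0):
--             m = q2 + 1
--             if 0 <= m < 2 ** W:
--                 return m, p, 0
--             elif 2 ** W <= m < 2 ** (W + 1):
--                 return m - 2 ** W, p, 1
--             else:
--                 raise RuntimeError("Invalid case. Not enough bits?")
--         q1, r1 = 2 * q1, 2 * r1
--         if r1 >= nc:
--             q1, r1 = q1 + 1, r1 - nc
--         q2, r2 = 2 * q2, 2 * r2 + 1
--         if r2 >= d:
--             q2, r2 = q2 + 1, r2 - d
-- ===== Notes on version B (the rewrite author's own statement) =====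
-- stated objective: faster
-- what changed: Replaces A's per-iteration big-integer computations of 2**p, (2**p-1)%d and the // in m by the incremental Hacker's Delight Fig. 10-2 state (q1,r1,q2,r2) updated by doubling with a conditional carry, so each pass uses only a few word-sized additions and comparisons instead of computing fresh p-bit powers, mods and divisions.
-- outside the precondition, e.g. on get_magic_number(9, 3): A returns (1, 0, 0), B returns None; on get_magic_number(-1, 0): A returns (0, 0, 1), B raises ZeroDivisionError
import Mathlib
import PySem

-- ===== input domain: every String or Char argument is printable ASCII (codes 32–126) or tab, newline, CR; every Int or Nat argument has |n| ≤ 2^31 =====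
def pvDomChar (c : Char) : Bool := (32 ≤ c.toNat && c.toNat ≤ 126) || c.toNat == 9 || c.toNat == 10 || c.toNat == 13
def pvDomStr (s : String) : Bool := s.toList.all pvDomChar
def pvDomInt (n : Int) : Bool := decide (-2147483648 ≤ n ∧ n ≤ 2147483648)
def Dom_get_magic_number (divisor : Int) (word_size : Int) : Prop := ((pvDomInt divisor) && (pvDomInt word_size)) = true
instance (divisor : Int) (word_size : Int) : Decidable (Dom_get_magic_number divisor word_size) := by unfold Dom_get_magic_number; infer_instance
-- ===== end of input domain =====

-- B replaces A's per-iteration big-integer powers 2**p by an incrementally doubled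
-- quotient/remainder state (Hacker's Delight Fig. 10-2); equal return values on Pre_.

-- ===== PORT A =====
-- loop `for p in range(2*W+1)`: fuel counts the remaining iterations, p the current index.
-- fuel = 0 (loop fell through): Python returns None; the `else: raise RuntimeError` branch:
-- both are excluded by Pre_ (A returns no value of the type there); default (0,0,0).
def pvA_loop (d W nc : Int) : Nat → Nat → Int × Int × Int
  | _, 0 => (0, 0, 0)
  | p, fuel+1 =>
    if (2:Int)^p > nc * (d - 1 - PySem.Int.mod ((2:Int)^p - 1) d) then
      let m := PySem.Int.floordiv ((2:Int)^p + d - 1 - PySem.Int.mod ((2:Int)^p - 1) d) d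
      if 0 ≤ m ∧ m < (2:Int)^W.toNat then (m, (p:Int), 0)
      else if (2:Int)^W.toNat ≤ m ∧ m < (2:Int)^(W.toNat+1) then (m - (2:Int)^W.toNat, (p:Int), 1)
      else (0, 0, 0)
    else pvA_loop d W nc (p+1) fuel

def get_magic_number (divisor : Int) (word_size : Int) : Int × Int × Int :=
  let d := divisor
  let W := word_size
  let nc := PySem.Int.floordiv ((2:Int)^W.toNat) d * d - 1
  pvA_loop d W nc 0 (2 * W.toNat + 1)

-- ===== PORT B =====
def pvB_loop (d W nc : Int) : Int → Int → Int → Int → Nat → Nat → Int × Int × Int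
  | _, _, _, _, _, 0 => (0, 0, 0)
  | q1, r1, q2, r2, p, fuel+1 =>
    let delta := d - 1 - r2
    if q1 > delta ∨ (q1 = delta ∧ r1 > 0) then
      let m := q2 + 1
      if 0 ≤ m ∧ m < (2:Int)^W.toNat then (m, (p:Int), 0)
      else if (2:Int)^W.toNat ≤ m ∧ m < (2:Int)^(W.toNat+1) then (m - (2:Int)^W.toNat, (p:Int), 1)
      else (0, 0, 0)
    else
      let q1' := 2 * q1
      let r1' := 2 * r1
      let s1 := if r1' ≥ nc then (q1' + 1, r1' - nc) else (q1', r1')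
      let q2' := 2 * q2
      let r2' := 2 * r2 + 1
      let s2 := if r2' ≥ d then (q2' + 1, r2' - d) else (q2', r2')
      pvB_loop d W nc s1.1 s1.2 s2.1 s2.2 (p+1) fuel

def get_magic_number_alt (divisor : Int) (word_size : Int) : Int × Int × Int :=
  let d := divisor
  let W := word_size
  let nc := PySem.Int.floordiv ((2:Int)^W.toNat) d * d - 1
  pvB_loop d W nc (PySem.Int.floordiv 1 nc) (PySem.Int.mod 1 nc) 0 0 0 (2 * W.toNat + 1)

-- ===== PRECONDITION & SPEC =====
-- Pre_ excludes divisors above 2**W (there A's value (1,0,0) is an accident of the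
-- negative nc; B returns None) and (d,W)=(-1,0) (B raises ZeroDivisionError, nc = 0);
-- it also excludes inputs where A itself raises or returns None (d = 0, W < 0).
def Pre_get_magic_number (divisor : Int) (word_size : Int) : Prop :=
  (1 ≤ word_size ∧ 1 ≤ divisor ∧ divisor ≤ (2:Int)^word_size.toNat) ∨
  (divisor ≤ -1 ∧ 0 ≤ word_size ∧ ¬(divisor = -1 ∧ word_size = 0))
instance (divisor : Int) (word_size : Int) : Decidable (Pre_get_magic_number divisor word_size) := by
  unfold Pre_get_magic_number; infer_instance

def pvWitness_get_magic_number : Int × Int := (3, 4)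

def Spec_get_magic_number (divisor : Int) (word_size : Int) (out : Int × Int × Int) : Prop := out = get_magic_number_alt divisor word_size
instance (divisor : Int) (word_size : Int) (out : Int × Int × Int) : Decidable (Spec_get_magic_number divisor word_size out) := by unfold Spec_get_magic_number; infer_instance

-- ===== CLAIM (what is proved, stated in full; the proofs are below) =====
def Claim_equal_get_magic_number : Prop := ∀ (divisor : Int) (word_size : Int), Dom_get_magic_number divisor word_size → Pre_get_magic_number divisor word_size → Spec_get_magic_number divisor word_size (get_magic_number divisor word_size)

-- ===== LEMMAS AND PROOFS =====

-- (2^p - 1) % d = r2 given the division identity and remainder bounds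
lemma pvmod_eq (x d q r : Int) (hd : 0 < d) (h : d * q + r = x) (h0 : 0 ≤ r) (h1 : r < d) :
    PySem.Int.mod x d = r := by
  rw [PySem.Int.mod_eq_emod_of_pos hd, ← h]
  rw [add_comm, Int.add_mul_emod_self_left]
  exact Int.emod_eq_of_lt h0 h1

-- A's test 2^p > nc*delta is B's comparison on the (q1, r1) state
lemma pvcond_iff (nc q1 r1 delta P : Int) (hnc : 0 < nc)
    (h : nc * q1 + r1 = P) (h0 : 0 ≤ r1) (h1 : r1 < nc) :
    (P > nc * delta) ↔ (q1 > delta ∨ (q1 = delta ∧ r1 > 0)) := by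
  subst h
  constructor
  · intro hP
    rcases lt_trichotomy q1 delta with hlt | heq | hgt
    · exfalso
      have : nc * q1 + nc ≤ nc * delta := by nlinarith
      linarith
    · exact Or.inr ⟨heq, by nlinarith⟩
    · exact Or.inl hgt
  · rintro (hgt | ⟨heq, hr⟩)
    · have : nc * delta + nc ≤ nc * q1 := by nlinarith
      linarith
    · subst heq; linarith

-- B's m = q2 + 1 equals A's quotient
lemma pvm_eq (d q2 r2 P : Int) (hd : 0 < d) (h : d * q2 + r2 = P - 1) :
    PySem.Int.floordiv (P + d - 1 - r2) d = q2 + 1 := by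
  have hnum : P + d - 1 - r2 = d * (q2 + 1) := by linarith [h]
  rw [hnum, PySem.Int.floordiv_eq_ediv_of_pos hd]
  exact Int.mul_ediv_cancel_left _ (by omega)

lemma pvloop_eq (d W nc : Int) (hd : 0 < d) (hnc : 0 < nc) :
    ∀ (fuel p : Nat) (q1 r1 q2 r2 : Int),
      nc * q1 + r1 = (2:Int)^p → 0 ≤ r1 → r1 < nc →
      d * q2 + r2 = (2:Int)^p - 1 → 0 ≤ r2 → r2 < d →
      pvA_loop d W nc p fuel = pvB_loop d W nc q1 r1 q2 r2 p fuel := by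
  intro fuel
  induction fuel with
  | zero => intro p q1 r1 q2 r2 _ _ _ _ _ _; rfl
  | succ n ih =>
    intro p q1 r1 q2 r2 h1 h1a h1b h2 h2a h2b
    rw [pvA_loop, pvB_loop]
    have hmod : PySem.Int.mod ((2:Int)^p - 1) d = r2 := pvmod_eq _ d q2 r2 hd h2 h2a h2b
    have hcond : ((2:Int)^p > nc * (d - 1 - PySem.Int.mod ((2:Int)^p - 1) d)) ↔
        (q1 > d - 1 - r2 ∨ (q1 = d - 1 - r2 ∧ r1 > 0)) := by
      rw [hmod]; exact pvcond_iff nc q1 r1 (d - 1 - r2) _ hnc h1 h1a h1b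
    by_cases hc : (2:Int)^p > nc * (d - 1 - PySem.Int.mod ((2:Int)^p - 1) d)
    · rw [if_pos hc, if_pos (hcond.mp hc)]
      have hm : PySem.Int.floordiv ((2:Int)^p + d - 1 - PySem.Int.mod ((2:Int)^p - 1) d) d = q2 + 1 := by
        rw [hmod]; exact pvm_eq d q2 r2 _ hd h2
      simp only [hm]
    · rw [if_neg hc, if_neg (fun h => hc (hcond.mpr h))]
      have hP : (2:Int)^(p+1) = 2 * (2:Int)^p := by ring
      by_cases hr1 : 2 * r1 ≥ nc <;> by_cases hr2 : 2 * r2 + 1 ≥ d <;>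
        simp only [hr1, hr2, if_true, if_false] <;>
        exact ih (p+1) _ _ _ _ (by rw [hP]; linear_combination 2 * h1) (by omega) (by omega)
          (by rw [hP]; linear_combination 2 * h2) (by omega) (by omega)

-- first-iteration agreement: for d < 0 both loops return at p = 0
lemma pvmod_self (d : Int) : PySem.Int.mod d d = 0 :=
  (PySem.Int.mod_eq_zero_iff_dvd d d).mpr dvd_rfl

lemma pvfloordiv_self (d : Int) (hd : d ≠ 0) : PySem.Int.floordiv d d = 1 := by
  have h := PySem.Int.floordiv_mul_add_mod d d
  rw [pvmod_self] at h
  have : PySem.Int.floordiv d d * d = 1 * d := by linarith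
  exact mul_right_cancel₀ hd this

lemma pvneg_eq (d W nc : Int) (fuel : Nat) (q1 r1 : Int)
    (hd : d < 0) (hnc : 0 < nc) (hq1 : 0 ≤ q1) :
    pvA_loop d W nc 0 (fuel+1) = pvB_loop d W nc q1 r1 0 0 0 (fuel+1) := by
  rw [pvA_loop, pvB_loop]
  have hmod0 : PySem.Int.mod ((2:Int)^(0:Nat) - 1) d = 0 := by
    norm_num
    exact (PySem.Int.mod_eq_zero_iff_dvd 0 d).mpr (dvd_zero d)
  have hcA : (2:Int)^(0:Nat) > nc * (d - 1 - PySem.Int.mod ((2:Int)^(0:Nat) - 1) d) := by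
    rw [hmod0]
    have : nc * (d - 1 - 0) < 0 := mul_neg_of_pos_of_neg hnc (by omega)
    norm_num
    linarith
  have hcB : q1 > d - 1 - 0 ∨ (q1 = d - 1 - 0 ∧ r1 > 0) := Or.inl (by omega)
  rw [if_pos hcA, if_pos hcB]
  have hnum : (2:Int)^(0:Nat) + d - 1 - PySem.Int.mod ((2:Int)^(0:Nat) - 1) d = d := by
    rw [hmod0]; norm_num
  have hm : PySem.Int.floordiv ((2:Int)^(0:Nat) + d - 1 - PySem.Int.mod ((2:Int)^(0:Nat) - 1) d) d = 0 + 1 := by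
    rw [hnum, pvfloordiv_self d (by omega)]; norm_num
  rw [hm]

-- ===== VERDICT (by name: the statement is the Claim_ definition above) =====
theorem get_magic_number_spec : Claim_equal_get_magic_number := by
  intro d W _ hpre
  unfold Spec_get_magic_number get_magic_number get_magic_number_alt
  rcases hpre with ⟨hW, hd1, hdW⟩ | ⟨hdneg, hW0, hne⟩
  · -- documented domain: 1 ≤ W, 1 ≤ d ≤ 2^W
    have hd : (0:Int) < d := by linarith
    have hdm := PySem.Int.floordiv_mul_add_mod ((2:Int)^W.toNat) d
    have hm0 : 0 ≤ PySem.Int.mod ((2:Int)^W.toNat) d := by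
      rw [PySem.Int.mod_eq_emod_of_pos hd]; exact Int.emod_nonneg _ (by omega)
    have hm1 : PySem.Int.mod ((2:Int)^W.toNat) d < d := by
      rw [PySem.Int.mod_eq_emod_of_pos hd]; exact Int.emod_lt_of_pos _ hd
    have h2 : (2:Int)^(1:Nat) ≤ (2:Int)^W.toNat :=
      pow_le_pow_right₀ (by norm_num) (by omega)
    have hnc : (0:Int) < PySem.Int.floordiv ((2:Int)^W.toNat) d * d - 1 := by
      rcases eq_or_lt_of_le hdW with heq | hlt
      · subst heq
        rw [pvmod_self] at hdm
        norm_num at h2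
        omega
      · omega
    have hq1 := PySem.Int.floordiv_mul_add_mod (1:Int) (PySem.Int.floordiv ((2:Int)^W.toNat) d * d - 1)
    have hr0 : 0 ≤ PySem.Int.mod (1:Int) (PySem.Int.floordiv ((2:Int)^W.toNat) d * d - 1) := by
      rw [PySem.Int.mod_eq_emod_of_pos hnc]; exact Int.emod_nonneg _ (by omega)
    have hr1 : PySem.Int.mod (1:Int) (PySem.Int.floordiv ((2:Int)^W.toNat) d * d - 1) < PySem.Int.floordiv ((2:Int)^W.toNat) d * d - 1 := by
      rw [PySem.Int.mod_eq_emod_of_pos hnc]; exact Int.emod_lt_of_pos _ hnc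
    show pvA_loop d W (PySem.Int.floordiv ((2:Int)^W.toNat) d * d - 1) 0 (2 * W.toNat + 1) =
      pvB_loop d W (PySem.Int.floordiv ((2:Int)^W.toNat) d * d - 1)
        (PySem.Int.floordiv 1 (PySem.Int.floordiv ((2:Int)^W.toNat) d * d - 1))
        (PySem.Int.mod 1 (PySem.Int.floordiv ((2:Int)^W.toNat) d * d - 1)) 0 0 0 (2 * W.toNat + 1)
    exact pvloop_eq d W _ hd hnc (2 * W.toNat + 1) 0 _ _ 0 0
      (by rw [pow_zero, mul_comm]; exact hq1) hr0 hr1 (by norm_num) le_rfl hd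
  · -- negative divisor: both sides return at the first pass
    have hdlt : d < 0 := by omega
    have hdm := PySem.Int.floordiv_mul_add_mod ((2:Int)^W.toNat) d
    have hb := PySem.Int.mod_neg_bounds ((2:Int)^W.toNat) hdlt
    have hnc : (0:Int) < PySem.Int.floordiv ((2:Int)^W.toNat) d * d - 1 := by
      by_cases hw : W = 0
      · subst hw
        simp only [Int.toNat_zero, pow_zero] at hdm hb ⊢
        have hr : PySem.Int.mod (1:Int) d ≠ 0 := by
          intro h0
          have : d ∣ 1 := (PySem.Int.mod_eq_zero_iff_dvd 1 d).mp h0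
          rcases Int.isUnit_iff.mp (isUnit_of_dvd_one this) with h1 | h1 <;> omega
        omega
      · have h2 : (2:Int)^(1:Nat) ≤ (2:Int)^W.toNat :=
          pow_le_pow_right₀ (by norm_num) (by omega)
        norm_num at h2
        omega
    have hq1 : 0 ≤ PySem.Int.floordiv 1 (PySem.Int.floordiv ((2:Int)^W.toNat) d * d - 1) := by
      rw [PySem.Int.floordiv_eq_ediv_of_pos hnc]
      exact Int.ediv_nonneg (by norm_num) (by omega)
    show pvA_loop d W (PySem.Int.floordiv ((2:Int)^W.toNat) d * d - 1) 0 (2 * W.toNat + 1) =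
      pvB_loop d W (PySem.Int.floordiv ((2:Int)^W.toNat) d * d - 1)
        (PySem.Int.floordiv 1 (PySem.Int.floordiv ((2:Int)^W.toNat) d * d - 1))
        (PySem.Int.mod 1 (PySem.Int.floordiv ((2:Int)^W.toNat) d * d - 1)) 0 0 0 (2 * W.toNat + 1)
    exact pvneg_eq d W _ (2 * W.toNat) _ _ hdlt hnc hq1
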